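-- pv_equiv track=rewrite | github.com/Tester-ringo/- | fractal_funcs/copy_and_paste_fractal.py | calc_odd_part
-- ===== SOURCE A (Python) =====
-- def F(L: int, U: int) -> int:
--     """
--     L, U: 奇数
--     [L, U) の奇数の総積を分割統治法で計算する。
--     """
--     if L >= U: return 1
--
--     max_bits = (U - 2).bit_length()  # 掛けられる最大の奇数のビット長
--     num_operands = (U - L) // 2  # 掛けられる奇数の個数
--
--     # [L, U) の奇数の総積のビット長は　max_bits * num_operands を超えない
--     # これが long に収まれば多倍長演算を回避して計算できる
--     if max_bits * num_operands < 63:  # 63 = sys.maxsize.bit_length()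
--         total = L
--         for i in range(L + 2, U, 2):
--             total *= i
--         return total
--
--     # 多倍長演算を回避するために分割して計算する
--     mid = (L + num_operands) | 1
--     left = F(L, mid)
--     right = F(mid, U)
--
--     return left * right
--
-- def calc_odd_part(n: int) -> int:
--     """
--     n! を (奇数) * (2の冪乗) と表したときの (奇数) の部分を計算する
--     """
--
--     result = 1
--     L_i = 3
--     tmp = 1  # F(3, U_i)
--     m = n.bit_length() - 1  # n // (2 ** m) > 0 となる最大の整数
--
--     for i in range(m - 1, -1, -1):
--         # U_i は n//(2**i) より大きい最小の奇数
--         U_i = ((n >> i) + 1) | 1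
--
--         # [1, U_i)　のうち、[1, L_i) は計算済みなので再利用し [L_i, U_i) のみ計算する
--         tmp *= F(L_i, U_i)
--
--         # 計算済みの範囲を更新 (L_{i} <- U_{i + 1})
--         L_i = U_i
--
--         result *= tmp
--
--     return result
-- ===== SOURCE B (Python) =====
-- def calc_odd_part(n: int) -> int:
--     result = 1
--     q = n
--     while q > 1:
--         prod = 1
--         for j in range(3, q + 1, 2):
--             prod *= j
--         result *= prod
--         q >>= 1
--     return result
-- ===== Notes on version B (the rewrite author's own statement) =====
-- stated objective: simpler
-- what changed: Replaces A's divide-and-conquer odd-range product F (bit-length splitting with incremental reuse of already-computed prefixes) by a plain nested loop: repeatedly halve q starting from n and multiply together the odd numbers from three up to q.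
import Mathlib
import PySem

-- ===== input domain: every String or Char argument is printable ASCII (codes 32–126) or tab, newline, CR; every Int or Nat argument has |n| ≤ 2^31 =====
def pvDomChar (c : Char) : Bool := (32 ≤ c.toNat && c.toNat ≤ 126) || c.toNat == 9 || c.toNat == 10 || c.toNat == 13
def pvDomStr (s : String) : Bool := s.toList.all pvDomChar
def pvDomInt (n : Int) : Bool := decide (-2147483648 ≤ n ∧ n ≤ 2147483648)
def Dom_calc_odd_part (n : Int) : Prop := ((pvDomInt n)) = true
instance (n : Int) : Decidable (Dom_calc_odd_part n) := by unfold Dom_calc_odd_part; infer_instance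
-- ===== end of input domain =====

-- B replaces A's divide-and-conquer odd-range product (bit-length splitting with incremental
-- reuse) by a plain nested loop: halve q from n to 1, multiplying the odd numbers 3..q directly
-- (objective: simpler; not faster).

-- ===== PORT A =====
-- F ported with an explicit fuel argument (Lean needs a structural measure; fuel (U-L).toNat at
-- each call site is enough for every call A makes, proved in pvF_eq_oddProd below).
def pvF : Nat → Int → Int → Int
  | 0, _, _ => 1  -- out of fuel: unreachable for the calls calc_odd_part makes
  | fuel+1, L, U =>
    if L ≥ U then 1
    else
      let maxBits : Int := (PySem.Int.bitLength (U - 2) : Int)   -- (U - 2).bit_length()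
      let numOperands := PySem.Int.floordiv (U - L) 2            -- (U - L) // 2
      if maxBits * numOperands < 63 then
        (PySem.List.pyRange (L + 2) U 2).foldl (fun total i => total * i) L
      else
        let mid := PySem.Int.bor (L + numOperands) 1             -- (L + num_operands) | 1
        pvF fuel L mid * pvF fuel mid U

-- loop state (result, L_i, tmp); i ≥ 0 on every loop element, so `n >> i` = `n >>> i.toNat` exactly
def calc_odd_part (n : Int) : Int :=
  let m : Int := (PySem.Int.bitLength n : Int) - 1
  ((PySem.List.pyRange (m - 1) (-1) (-1)).foldl
    (fun (st : Int × Int × Int) i =>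
      let U := PySem.Int.bor ((n >>> i.toNat) + 1) 1             -- ((n >> i) + 1) | 1
      let tmp := st.2.2 * pvF (U - st.2.1).toNat st.2.1 U
      (st.1 * tmp, U, tmp))
    (1, 3, 1)).1

-- ===== PORT B =====
-- the while loop of Source B: state (q, result)
def pvAltGo (q result : Int) : Int :=
  if h : 1 < q then
    pvAltGo (q >>> (1:Nat))
      (result * (PySem.List.pyRange 3 (q + 1) 2).foldl (fun p j => p * j) 1)
  else result
termination_by q.toNat
decreasing_by
  rw [Int.shiftRight_eq_div_pow]
  norm_num
  omega

def calc_odd_part_alt (n : Int) : Int := pvAltGo n 1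

-- ===== PRECONDITION & SPEC =====
def Spec_calc_odd_part (n : Int) (out : Int) : Prop := out = calc_odd_part_alt n
instance (n : Int) (out : Int) : Decidable (Spec_calc_odd_part n out) := by unfold Spec_calc_odd_part; infer_instance

-- ===== CLAIM (what is proved, stated in full; the proofs are below) =====
def Claim_equal_calc_odd_part : Prop := ∀ (n : Int), Dom_calc_odd_part n → Spec_calc_odd_part n (calc_odd_part n)

-- ===== LEMMAS AND PROOFS =====

-- reference value: the product of L, L+2, L+4, … below U
def oddProd (L U : Int) : Int :=
  if L < U then L * oddProd (L + 2) U else 1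
termination_by (U - L).toNat

-- U_i of A's loop
def uodd (n : Int) (i : Nat) : Int := PySem.Int.bor ((n >>> i) + 1) 1

-- the factor contributed at index i
def tpr (n : Int) (i : Nat) : Int := oddProd 3 (uodd n i)

-- product of the factors for indices 0 … k-1 (A's accumulation order)
def wprod (n : Int) : Nat → Int
  | 0 => 1
  | k+1 => tpr n k * wprod n k

-- product of the last j factors, smallest index first (B's accumulation order); bl = bit_length n
def tailProd (n : Int) (bl : Nat) : Nat → Int
  | 0 => 1
  | j+1 => tpr n (bl - 1 - (j+1)) * tailProd n bl j

theorem two_mul_lor_one (k : Nat) : (2 * k) ||| 1 = 2 * k + 1 := by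
  apply Nat.eq_of_testBit_eq
  intro i
  rw [Nat.testBit_lor]
  cases i with
  | zero => simp [Nat.testBit_zero, Nat.mul_comm]
  | succ j =>
    have e : (2 * k + 1) / 2 = 2 * k / 2 := by omega
    simp [Nat.testBit_succ, e]

theorem two_mul_add_one_lor_one (k : Nat) : (2 * k + 1) ||| 1 = 2 * k + 1 := by
  apply Nat.eq_of_testBit_eq
  intro i
  rw [Nat.testBit_lor]
  cases i with
  | zero => simp [Nat.testBit_zero]
  | succ j => simp [Nat.testBit_succ]

theorem nat_lor_one (m : Nat) : m ||| 1 = if m % 2 = 0 then m + 1 else m := by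
  rcases Nat.even_or_odd m with ⟨k, hk⟩ | ⟨k, hk⟩
  · have h2 : m = 2 * k := by omega
    subst h2
    rw [if_pos (by omega), two_mul_lor_one]
  · have h2 : m = 2 * k + 1 := by omega
    subst h2
    rw [if_neg (by omega), two_mul_add_one_lor_one]

theorem bor_one (x : Int) : PySem.Int.bor x 1 = if 2 ∣ x then x + 1 else x := by
  unfold PySem.Int.bor
  by_cases hx : 0 ≤ x
  · rw [if_pos hx, if_pos (by norm_num : (0:Int) ≤ 1)]
    rw [show (1:Int).toNat = 1 from rfl, nat_lor_one]
    have hxt : (x.toNat : Int) = x := Int.toNat_of_nonneg hx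
    by_cases hp : x.toNat % 2 = 0
    · rw [if_pos hp, if_pos (by omega)]
      omega
    · rw [if_neg hp, if_neg (by omega)]
      omega
  · rw [if_neg hx, if_pos (by norm_num : (0:Int) ≤ 1)]
    rw [show (1:Int).toNat = 1 from rfl, Nat.and_one_is_mod]
    set m := (-x - 1).toNat with hm
    have hxm : x = -(m : Int) - 1 := by omega
    by_cases hp : m % 2 = 0
    · rw [hp]
      rw [if_neg (by omega)]
      omega
    · have hp1 : m % 2 = 1 := by omega
      rw [hp1, if_pos (by omega)]
      omega

theorem bor_one_not_two_dvd (x : Int) : ¬ 2 ∣ PySem.Int.bor x 1 := by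
  rw [bor_one]
  split <;> omega

theorem bor_one_bounds (x : Int) : x ≤ PySem.Int.bor x 1 ∧ PySem.Int.bor x 1 ≤ x + 1 := by
  rw [bor_one]; split <;> omega

theorem bor_one_mono {x y : Int} (h : x ≤ y) : PySem.Int.bor x 1 ≤ PySem.Int.bor y 1 := by
  rw [bor_one, bor_one]
  split <;> split <;> omega

theorem oddProd_pos {L U : Int} (h : L < U) : oddProd L U = L * oddProd (L + 2) U := by
  rw [oddProd]
  exact if_pos h

theorem oddProd_nonpos {L U : Int} (h : ¬ L < U) : oddProd L U = 1 := by
  rw [oddProd]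
  exact if_neg h

theorem pyRange_two_nil {L U : Int} (h : U ≤ L) : PySem.List.pyRange L U 2 = [] := by
  rw [PySem.List.pyRange_of_pos L U (by norm_num)]
  rw [if_neg (by omega)]
  simp

theorem pyRange_two_cons {L U : Int} (h : L < U) :
    PySem.List.pyRange L U 2 = L :: PySem.List.pyRange (L + 2) U 2 := by
  rw [PySem.List.pyRange_of_pos L U (by norm_num), PySem.List.pyRange_of_pos (L+2) U (by norm_num)]
  rw [if_pos h]
  by_cases h2 : L + 2 < U
  · rw [if_pos h2]
    have e : ((U - L + 2 - 1) / 2).toNat = ((U - (L+2) + 2 - 1) / 2).toNat + 1 := by omega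
    rw [e, List.range_succ_eq_map]
    simp only [List.map_cons, List.map_map]
    congr 1
    · norm_num
    · apply List.map_congr_left
      intro k _
      simp only [Function.comp]
      push_cast
      ring
  · rw [if_neg h2]
    have e : ((U - L + 2 - 1) / 2).toNat = 1 := by omega
    rw [e]
    norm_num

theorem foldl_mul_init (l : List Int) (a : Int) :
    l.foldl (fun p j => p * j) a = a * l.foldl (fun p j => p * j) 1 := by
  induction l generalizing a with
  | nil => simp
  | cons x xs ih =>
    simp only [List.foldl_cons]
    rw [ih (a * x), ih (1 * x)]
    ring

theorem foldl_pyRange_two_eq_oddProd (L U : Int) :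
    (PySem.List.pyRange L U 2).foldl (fun p j => p * j) 1 = oddProd L U := by
  by_cases h : L < U
  · rw [pyRange_two_cons h, List.foldl_cons, foldl_mul_init,
      foldl_pyRange_two_eq_oddProd (L+2) U, oddProd_pos h]
    ring
  · rw [pyRange_two_nil (by omega), oddProd_nonpos h]
    simp
termination_by (U - L).toNat
decreasing_by omega

theorem oddProd_split {L M U : Int} (h1 : L ≤ M) (h2 : M ≤ U) (h3 : (2:Int) ∣ M - L) :
    oddProd L U = oddProd L M * oddProd M U := by
  by_cases h : L < M
  · rw [oddProd_pos (show L < U by omega), oddProd_pos h,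
      oddProd_split (show L + 2 ≤ M by omega) h2 (show (2:Int) ∣ M - (L + 2) by omega)]
    ring
  · have e : L = M := by omega
    subst e
    rw [oddProd_nonpos (show ¬ L < L by omega)]
    ring
termination_by (M - L).toNat
decreasing_by omega

theorem oddProd_even_top {L b : Int} (hL : ¬ (2:Int) ∣ L) (hb : (2:Int) ∣ b) :
    oddProd L b = oddProd L (b + 1) := by
  by_cases h : L < b
  · rw [oddProd_pos h, oddProd_pos (show L < b + 1 by omega),
      oddProd_even_top (L := L + 2) (b := b) (by omega) hb]
  · rw [oddProd_nonpos h, oddProd_nonpos (show ¬ L < b + 1 by omega)]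
termination_by (b - L).toNat
decreasing_by omega

theorem oddProd_bor {L b : Int} (hL : ¬ (2:Int) ∣ L) :
    oddProd L b = oddProd L (PySem.Int.bor b 1) := by
  rw [bor_one]
  by_cases h : (2:Int) ∣ b
  · rw [if_pos h, oddProd_even_top hL h]
  · rw [if_neg h]

theorem bitLength_le_of_lt {x : Int} {k : Nat} (h : x.natAbs < 2 ^ k) :
    PySem.Int.bitLength x ≤ k := by
  by_cases hz : x = 0
  · subst hz
    simp [PySem.Int.bitLength_zero]
  · by_contra hgt
    have h1 := PySem.Int.two_pow_bitLength_le x hz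
    have h2 : k + 1 ≤ PySem.Int.bitLength x := by omega
    have h3 : (2:Nat) ^ k ≤ 2 ^ (PySem.Int.bitLength x - 1) :=
      Nat.pow_le_pow_right (by norm_num) (by omega)
    omega

-- F computes the odd-range product, given enough fuel, odd L and moderate bounds
theorem pvF_eq_oddProd (fuel : Nat) (L U : Int) (hf : (U - L).toNat ≤ fuel)
    (hodd : ¬ (2:Int) ∣ L) (hlo : -(2^40) ≤ L) (hhi : U ≤ 2^40) :
    pvF fuel L U = oddProd L U := by
  induction fuel generalizing L U with
  | zero =>
    rw [oddProd_nonpos (by omega)]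
    rfl
  | succ fuel ih =>
    rw [pvF]
    by_cases hLU : L ≥ U
    · rw [if_pos hLU, oddProd_nonpos (by omega)]
    · rw [if_neg hLU]
      simp only []
      have hnumdef : PySem.Int.floordiv (U - L) 2 = (U - L) / 2 :=
        PySem.Int.floordiv_eq_ediv_of_pos (by norm_num)
      by_cases hsmall : (PySem.Int.bitLength (U - 2) : Int) * PySem.Int.floordiv (U - L) 2 < 63
      · rw [if_pos hsmall, foldl_mul_init, foldl_pyRange_two_eq_oddProd (L+2) U,
          ← oddProd_pos (show L < U by omega)]
      · rw [if_neg hsmall]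
        have habs : (U - 2).natAbs < 2 ^ 62 := by
          have h40 : (2:Int) ^ 40 = 1099511627776 := by norm_num
          have h62 : (2:Nat) ^ 62 = 4611686018427387904 := by norm_num
          omega
        have hbl : (PySem.Int.bitLength (U - 2) : Int) ≤ 62 := by
          exact_mod_cast bitLength_le_of_lt habs
        have hbl0 : (0:Int) ≤ (PySem.Int.bitLength (U - 2) : Int) := by positivity
        have hnum2 : 2 ≤ (U - L) / 2 := by
          by_contra hlt
          have h1 : PySem.Int.floordiv (U - L) 2 ≤ 1 := by omega
          have h0 : 0 ≤ PySem.Int.floordiv (U - L) 2 := by omega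
          have : (PySem.Int.bitLength (U - 2) : Int) * PySem.Int.floordiv (U - L) 2 ≤ 62 := by
            nlinarith
          omega
        have hUL4 : 4 ≤ U - L := by omega
        have hb := bor_one_bounds (L + PySem.Int.floordiv (U - L) 2)
        set mid := PySem.Int.bor (L + PySem.Int.floordiv (U - L) 2) 1 with hmiddef
        have hmodd : ¬ (2:Int) ∣ mid := bor_one_not_two_dvd _
        have hmlo : L + 2 ≤ mid := by omega
        have hmhi : mid ≤ U - 1 := by omega
        rw [ih L mid (by omega) hodd hlo (by omega),
          ih mid U (by omega) hmodd (by omega) hhi,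
          ← oddProd_split (by omega) (by omega) (by omega)]


-- ---- shift arithmetic ----

theorem shr_succ (x : Int) (k : Nat) : x >>> (k + 1) = (x >>> k) >>> (1:Nat) := by
  rw [Int.shiftRight_eq_div_pow, Int.shiftRight_eq_div_pow, Int.shiftRight_eq_div_pow,
    Int.ediv_ediv_of_nonneg (by positivity)]
  push_cast
  rw [pow_succ]

theorem shr_le_self {x : Int} (hx : 0 ≤ x) (k : Nat) : x >>> k ≤ x := by
  rw [Int.shiftRight_eq_div_pow]
  apply Int.ediv_le_self _ hx

theorem shr_antitone {x : Int} (hx : 0 ≤ x) {i j : Nat} (h : i ≤ j) : x >>> j ≤ x >>> i := by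
  rw [Int.shiftRight_eq_div_pow, Int.shiftRight_eq_div_pow]
  have e : ((2^j : Nat) : Int) = ((2^i : Nat) : Int) * ((2^(j-i) : Nat) : Int) := by
    push_cast
    rw [← pow_add]
    congr 1
    omega
  rw [e, ← Int.ediv_ediv_of_nonneg (by positivity)]
  exact Int.ediv_le_self _ (by positivity)

theorem shr_neg {x : Int} (hx : x ≤ -1) (k : Nat) : x >>> k ≤ -1 := by
  rw [Int.shiftRight_eq_div_pow]
  have := Int.ediv_neg_of_neg_of_pos (a := x) (b := ((2^k : Nat) : Int)) (by omega) (by positivity)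
  omega

theorem shr_mono_neg {x : Int} (hx : x ≤ -1) {i j : Nat} (h : i ≤ j) : x >>> i ≤ x >>> j := by
  rw [Int.shiftRight_eq_div_pow, Int.shiftRight_eq_div_pow]
  have e : ((2^j : Nat) : Int) = ((2^i : Nat) : Int) * ((2^(j-i) : Nat) : Int) := by
    push_cast
    rw [← pow_add]
    congr 1
    omega
  rw [e, ← Int.ediv_ediv_of_nonneg (by positivity)]
  have hy : x / ((2^i : Nat) : Int) < 0 :=
    Int.ediv_neg_of_neg_of_pos (by omega) (by positivity)
  rw [Int.le_ediv_iff_mul_le (by positivity)]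
  have hc : (1:Int) ≤ ((2^(j-i) : Nat) : Int) := by
    have : (1:Nat) ≤ 2^(j-i) := Nat.one_le_two_pow
    exact_mod_cast this
  nlinarith

theorem shr_ge_one {x : Int} {k : Nat} (h : (2:Int)^k ≤ x) : 1 ≤ x >>> k := by
  rw [Int.shiftRight_eq_div_pow, Int.le_ediv_iff_mul_le (by positivity)]
  push_cast
  omega

theorem shr_ge_two {x : Int} {k : Nat} (h : (2:Int)^(k+1) ≤ x) : 2 ≤ x >>> k := by
  rw [Int.shiftRight_eq_div_pow, Int.le_ediv_iff_mul_le (by positivity)]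
  push_cast
  rw [pow_succ] at h
  omega

theorem shr_lt_two {x : Int} {k : Nat} (h : x < (2:Int)^(k+1)) : x >>> k < 2 := by
  rw [Int.shiftRight_eq_div_pow, Int.ediv_lt_iff_lt_mul (by positivity)]
  push_cast
  rw [pow_succ] at h
  omega

-- ---- bit length of n as Int bounds ----

theorem bitLength_lb {n : Int} (hn : 0 ≤ n) (hnz : n ≠ 0) :
    (2:Int) ^ (PySem.Int.bitLength n - 1) ≤ n := by
  have h := PySem.Int.two_pow_bitLength_le n hnz
  have h2 : ((2 ^ (PySem.Int.bitLength n - 1) : Nat) : Int) ≤ (n.natAbs : Int) := by exact_mod_cast h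
  have e : ((2 ^ (PySem.Int.bitLength n - 1) : Nat) : Int) = (2:Int) ^ (PySem.Int.bitLength n - 1) := by
    push_cast
    ring
  rw [e] at h2
  omega

theorem bitLength_ub (n : Int) : n.natAbs < 2 ^ PySem.Int.bitLength n :=
  PySem.Int.lt_two_pow_bitLength n

theorem bitLength_ub_int {n : Int} (hn : 0 ≤ n) : n < (2:Int) ^ PySem.Int.bitLength n := by
  have h := bitLength_ub n
  have h2 : ((n.natAbs : Nat) : Int) < ((2 ^ PySem.Int.bitLength n : Nat) : Int) := by exact_mod_cast h
  have e : ((2 ^ PySem.Int.bitLength n : Nat) : Int) = (2:Int) ^ PySem.Int.bitLength n := by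
    push_cast
    ring
  rw [e] at h2
  omega

theorem bitLength_pos {n : Int} (hnz : n ≠ 0) : 1 ≤ PySem.Int.bitLength n := by
  by_contra h
  have h0 : PySem.Int.bitLength n = 0 := by omega
  have := bitLength_ub n
  rw [h0] at this
  simp at this
  omega

theorem bitLength_ge_two {n : Int} (hn : 2 ≤ n) : 2 ≤ PySem.Int.bitLength n := by
  by_contra h
  have h1 := bitLength_ub n
  have h2 : (2:Nat) ^ PySem.Int.bitLength n ≤ 2 ^ 1 := Nat.pow_le_pow_right (by norm_num) (by omega)
  have h3 : (2:Nat) ^ 1 = 2 := by norm_num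
  omega

-- ---- uodd facts ----

theorem uodd_odd (n : Int) (i : Nat) : ¬ (2:Int) ∣ uodd n i := bor_one_not_two_dvd _

theorem uodd_ge_three {n : Int} {i : Nat} (h : 1 ≤ n >>> i) : 3 ≤ uodd n i := by
  unfold uodd
  have hb := bor_one_bounds ((n >>> i) + 1)
  have ho := bor_one_not_two_dvd ((n >>> i) + 1)
  omega

theorem uodd_le {n : Int} (hn : 0 ≤ n) (i : Nat) : uodd n i ≤ n + 2 := by
  unfold uodd
  have hb := bor_one_bounds ((n >>> i) + 1)
  have hs := shr_le_self hn i
  omega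

theorem uodd_antitone {n : Int} (hn : 0 ≤ n) {i j : Nat} (h : i ≤ j) : uodd n j ≤ uodd n i := by
  unfold uodd
  exact bor_one_mono (by have := shr_antitone hn h; omega)

theorem uodd_mono_neg {n : Int} (hn : n ≤ -1) {i j : Nat} (h : i ≤ j) : uodd n i ≤ uodd n j := by
  unfold uodd
  exact bor_one_mono (by have := shr_mono_neg hn h; omega)

theorem uodd_le_one_of_neg {n : Int} (hn : n ≤ -1) (i : Nat) : uodd n i ≤ 1 := by
  unfold uodd
  have hs := shr_neg hn i
  rw [bor_one]
  split <;> omega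

theorem shr_top {n : Int} (hn : 2 ≤ n) : n >>> (PySem.Int.bitLength n - 1) = 1 := by
  have hB2 := bitLength_ge_two hn
  have h1 : 1 ≤ n >>> (PySem.Int.bitLength n - 1) :=
    shr_ge_one (bitLength_lb (by omega) (by omega))
  have h2 : n >>> (PySem.Int.bitLength n - 1) < 2 := by
    apply shr_lt_two
    have := bitLength_ub_int (n := n) (by omega)
    have e : PySem.Int.bitLength n - 1 + 1 = PySem.Int.bitLength n := by omega
    rw [e]
    exact this
  omega

theorem uodd_top {n : Int} (hn : 2 ≤ n) :
    uodd n (PySem.Int.bitLength n - 1) = 3 := by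
  unfold uodd
  rw [shr_top hn]
  decide

theorem shr_gt_one {n : Int} (hn : 2 ≤ n) {k : Nat} (hk : k ≤ PySem.Int.bitLength n - 2) :
    2 ≤ n >>> k := by
  apply shr_ge_two
  calc (2:Int)^(k+1) ≤ 2 ^ (PySem.Int.bitLength n - 1) := by
        apply pow_le_pow_right₀ (by norm_num)
        have := bitLength_ge_two hn
        omega
    _ ≤ n := bitLength_lb (by omega) (by omega)

-- ---- product bookkeeping ----

theorem wprod_eq_prod (n : Int) (k : Nat) :
    wprod n k = ((List.range k).map (tpr n)).prod := by
  induction k with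
  | zero => simp [wprod]
  | succ k ih =>
    rw [wprod, ih, List.range_succ, List.map_append, List.prod_append]
    simp [mul_comm]

theorem tailProd_eq_prod (n : Int) (bl : Nat) :
    ∀ j : Nat, j ≤ bl - 1 →
      tailProd n bl j = ((List.range j).map (fun t => tpr n (bl - 1 - j + t))).prod := by
  intro j
  induction j with
  | zero => simp [tailProd]
  | succ j ih =>
    intro hj
    rw [tailProd, ih (by omega), List.range_succ_eq_map]
    simp only [List.map_cons, List.prod_cons, List.map_map]
    congr 1
    apply congrArg
    apply List.map_congr_left
    intro t _
    simp only [Function.comp]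
    congr 1
    omega

theorem tailProd_eq_wprod (n : Int) (bl : Nat) :
    tailProd n bl (bl - 1) = wprod n (bl - 1) := by
  rw [wprod_eq_prod, tailProd_eq_prod n bl (bl - 1) (by omega)]
  apply congrArg
  apply List.map_congr_left
  intro t ht
  congr 1
  rw [List.mem_range] at ht
  omega

-- ---- A's loop (n ≥ 2) ----

theorem aLoop_pos (n : Int) (hn : 2 ≤ n) (hDom : n ≤ 2147483648) :
    ∀ (k : Nat), k ≤ PySem.Int.bitLength n - 1 → ∀ R : Int,
      ((PySem.List.pyRange ((k : Int) - 1) (-1) (-1)).foldl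
        (fun (st : Int × Int × Int) i =>
          let U := PySem.Int.bor ((n >>> i.toNat) + 1) 1
          let tmp := st.2.2 * pvF (U - st.2.1).toNat st.2.1 U
          (st.1 * tmp, U, tmp))
        (R, uodd n k, tpr n k)).1 = R * wprod n k := by
  have hB2 := bitLength_ge_two hn
  intro k
  induction k with
  | zero =>
    intro _ R
    rw [PySem.List.pyRange_neg_one_eq_nil (by norm_num)]
    simp [wprod]
  | succ k ih =>
    intro hk R
    have hc : ((k + 1 : Nat) : Int) - 1 = ((k : Nat) : Int) := by push_cast; ring
    rw [hc, PySem.List.pyRange_neg_one_cons (by omega), List.foldl_cons]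
    simp only [Int.toNat_natCast, Int.shiftRight_natCast_right]
    rw [show PySem.Int.bor ((n >>> k) + 1) 1 = uodd n k from rfl]
    have hshr1 : 1 ≤ n >>> (k + 1) := by
      apply shr_ge_one
      calc (2:Int) ^ (k+1) ≤ 2 ^ (PySem.Int.bitLength n - 1) :=
            pow_le_pow_right₀ (by norm_num) (by omega)
        _ ≤ n := bitLength_lb (by omega) (by omega)
    have h3le : 3 ≤ uodd n (k + 1) := uodd_ge_three hshr1
    have hmono : uodd n (k + 1) ≤ uodd n k := uodd_antitone (by omega) (by omega)
    have hub : uodd n k ≤ n + 2 := uodd_le (by omega) k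
    have hF := pvF_eq_oddProd ((uodd n k - uodd n (k + 1)).toNat) (uodd n (k + 1)) (uodd n k)
      le_rfl (uodd_odd n (k + 1)) (by norm_num; omega) (by norm_num; omega)
    rw [hF]
    have hdvd : (2:Int) ∣ uodd n (k + 1) - 3 := by
      have h1 := uodd_odd n (k + 1)
      omega
    rw [show tpr n (k+1) = oddProd 3 (uodd n (k+1)) from rfl,
      ← oddProd_split (by omega) hmono hdvd,
      show oddProd 3 (uodd n k) = tpr n k from rfl]
    have ih' := ih (by omega) (R * tpr n k)
    simp only [Int.shiftRight_natCast_right] at ih'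
    rw [ih', wprod]
    ring

-- ---- A's loop (n ≤ -1): every F call has L ≥ U, nothing changes ----

theorem aLoop_neg (n : Int) (hn : n ≤ -1) :
    ∀ (kN : Nat) (L : Int), (∀ i : Nat, i < kN → uodd n i ≤ L) →
      ∃ L', ((PySem.List.pyRange ((kN : Int) - 1) (-1) (-1)).foldl
        (fun (st : Int × Int × Int) i =>
          let U := PySem.Int.bor ((n >>> i.toNat) + 1) 1
          let tmp := st.2.2 * pvF (U - st.2.1).toNat st.2.1 U
          (st.1 * tmp, U, tmp))
        (1, L, 1)) = (1, L', 1) := by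
  intro kN
  induction kN with
  | zero =>
    intro L _
    exact ⟨L, by rw [PySem.List.pyRange_neg_one_eq_nil (by norm_num)]; rfl⟩
  | succ kN ih =>
    intro L hyp
    have hc : ((kN + 1 : Nat) : Int) - 1 = ((kN : Nat) : Int) := by push_cast; ring
    rw [hc, PySem.List.pyRange_neg_one_cons (by omega), List.foldl_cons]
    simp only [Int.toNat_natCast, Int.shiftRight_natCast_right]
    rw [show PySem.Int.bor ((n >>> kN) + 1) 1 = uodd n kN from rfl]
    have hUL : uodd n kN ≤ L := hyp kN (by omega)
    have hfuel : (uodd n kN - L).toNat = 0 := by omega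
    rw [hfuel]
    have hred : (1:Int) * pvF 0 L (uodd n kN) = 1 := by rw [pvF]; ring
    rw [hred]
    have hnext : ∀ i : Nat, i < kN → uodd n i ≤ uodd n kN := by
      intro i hi
      exact uodd_mono_neg hn (by omega)
    obtain ⟨L', hL'⟩ := ih (uodd n kN) hnext
    simp only [Int.shiftRight_natCast_right] at hL'
    exact ⟨L', by rw [mul_one, ← hL']⟩

-- ---- B's loop ----

theorem bLoop (n : Int) (hn : 2 ≤ n) :
    ∀ (j : Nat), j ≤ PySem.Int.bitLength n - 1 → ∀ R : Int,
      pvAltGo (n >>> (PySem.Int.bitLength n - 1 - j)) R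
        = R * tailProd n (PySem.Int.bitLength n) j := by
  have hB2 := bitLength_ge_two hn
  intro j
  induction j with
  | zero =>
    intro _ R
    rw [Nat.sub_zero, pvAltGo, dif_neg (by rw [shr_top hn]; omega)]
    simp [tailProd]
  | succ j ih =>
    intro hj R
    have hq2 : 2 ≤ n >>> (PySem.Int.bitLength n - 1 - (j + 1)) :=
      shr_gt_one hn (by omega)
    rw [pvAltGo, dif_pos (by omega)]
    have hsh : (n >>> (PySem.Int.bitLength n - 1 - (j + 1))) >>> (1:Nat)
        = n >>> (PySem.Int.bitLength n - 1 - j) := by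
      rw [← shr_succ]
      congr 1
      omega
    rw [hsh, foldl_pyRange_two_eq_oddProd,
      oddProd_bor (by decide : ¬ (2:Int) ∣ 3),
      show PySem.Int.bor ((n >>> (PySem.Int.bitLength n - 1 - (j+1))) + 1) 1
        = uodd n (PySem.Int.bitLength n - 1 - (j+1)) from rfl,
      show oddProd 3 (uodd n (PySem.Int.bitLength n - 1 - (j+1)))
        = tpr n (PySem.Int.bitLength n - 1 - (j+1)) from rfl]
    rw [ih (by omega), tailProd]
    ring

-- ===== VERDICT (by name: the statement is the Claim_ definition above) =====
theorem calc_odd_part_spec : Claim_equal_calc_odd_part := by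
  intro n hDom
  unfold Spec_calc_odd_part
  have hD : -2147483648 ≤ n ∧ n ≤ 2147483648 := by
    unfold Dom_calc_odd_part pvDomInt at hDom
    simpa using hDom
  by_cases h2 : 2 ≤ n
  · have hB2 := bitLength_ge_two h2
    simp only [calc_odd_part, calc_odd_part_alt, Int.shiftRight_natCast_right]
    have hc : (PySem.Int.bitLength n : Int) - 1 - 1
        = ((PySem.Int.bitLength n - 1 : Nat) : Int) - 1 := by omega
    rw [hc]
    have h3 : ((1:Int), (3:Int), (1:Int))
        = (1, uodd n (PySem.Int.bitLength n - 1), tpr n (PySem.Int.bitLength n - 1)) := by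
      rw [show tpr n (PySem.Int.bitLength n - 1)
            = oddProd 3 (uodd n (PySem.Int.bitLength n - 1)) from rfl]
      rw [uodd_top h2, oddProd_nonpos (by omega)]
    rw [h3]
    have hA := aLoop_pos n h2 hD.2 (PySem.Int.bitLength n - 1) le_rfl 1
    simp only [Int.shiftRight_natCast_right] at hA
    rw [hA]
    have hB := bLoop n h2 (PySem.Int.bitLength n - 1) le_rfl 1
    rw [Nat.sub_self] at hB
    rw [show n >>> (0:Nat) = n from by simp [Int.shiftRight_eq_div_pow]] at hB
    rw [hB, tailProd_eq_wprod]
  · by_cases h0 : n ≤ -1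
    · simp only [calc_odd_part, calc_odd_part_alt, Int.shiftRight_natCast_right]
      have hB1 := bitLength_pos (show n ≠ 0 by omega)
      have hc : (PySem.Int.bitLength n : Int) - 1 - 1
          = ((PySem.Int.bitLength n - 1 : Nat) : Int) - 1 := by omega
      rw [hc]
      obtain ⟨L', hL'⟩ := aLoop_neg n h0 (PySem.Int.bitLength n - 1) 3
        (fun i _ => le_trans (uodd_le_one_of_neg h0 i) (by norm_num))
      simp only [Int.shiftRight_natCast_right] at hL'
      rw [hL']
      rw [pvAltGo, dif_neg (by omega)]
    · have h01 : n = 0 ∨ n = 1 := by omega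
      rcases h01 with h | h <;> subst h <;>
        · unfold calc_odd_part_alt
          rw [pvAltGo, dif_neg (by norm_num)]
          decide
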